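-- pv_equiv track=rewrite | github.com/audeoudh/ext4-reader | ext4/tools.py | human_readable_mode
-- ===== SOURCE A (Python) =====
-- def human_readable_mode(mode):
--     """Convert integer-style access rights to string-style notation"""
--     sbits = mode >> 9
--     u_modes = mode >> 6 & 0o7, mode >> 3 & 0o7, mode & 0o7
--     s = ""
--     for m, ss, ssf in zip(u_modes, "sst", (0o4, 0o2, 0o1)):
--         s += 'r' if m & 0o4 else '-'
--         s += 'w' if m & 0o2 else '-'
--         if sbits & ssf:
--             s += ss if m & 0o1 else ss.upper()
--         else:
--             s += 'x' if m & 0o1 else '-'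
--     return s
-- ===== SOURCE B (Python) =====
-- _PERMS = ('---', '--x', '-w-', '-wx', 'r--', 'r-x', 'rw-', 'rwx')
--
--
-- def _block(g, special, letter):
--     p = _PERMS[g]
--     if not special:
--         return p
--     return p[:2] + (letter if g & 1 else letter.upper())
--
--
-- def human_readable_mode(mode):
--     """Convert integer-style access rights to string-style notation"""
--     sbits = mode >> 9
--     return (_block(mode >> 6 & 0o7, sbits & 0o4, 's')
--             + _block(mode >> 3 & 0o7, sbits & 0o2, 's')
--             + _block(mode & 0o7, sbits & 0o1, 't'))
-- ===== Notes on version B (the rewrite author's own statement) =====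
-- stated objective: idiomatic
-- what changed: Replaces A's loop with per-bit branches by a precomputed permission-string table indexed by each octal digit of the mode, overlaying the setuid/setgid/sticky letter on the last character of a block only when its special bit is set.
import Mathlib
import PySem

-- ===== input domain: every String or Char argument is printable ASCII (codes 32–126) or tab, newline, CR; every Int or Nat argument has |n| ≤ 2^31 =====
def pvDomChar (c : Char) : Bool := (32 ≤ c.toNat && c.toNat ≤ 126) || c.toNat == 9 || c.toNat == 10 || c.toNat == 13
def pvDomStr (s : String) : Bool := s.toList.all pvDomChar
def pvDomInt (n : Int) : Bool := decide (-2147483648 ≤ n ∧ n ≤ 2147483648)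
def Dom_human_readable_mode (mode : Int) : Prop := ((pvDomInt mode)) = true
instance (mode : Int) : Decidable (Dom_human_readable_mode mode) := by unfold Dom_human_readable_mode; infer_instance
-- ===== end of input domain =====

-- B replaces A's per-bit branch loop by an 8-entry permission table indexed by each 3-bit group with a special-bit letter overlay (idiomatic; same O(1) cost).


-- ===== PORT A =====
-- literal port of A: the loop over zip(u_modes, "sst", (4, 2, 1)) becomes a foldl
-- over the corresponding 3-element list of triples; the string accumulator is a
-- List Char wrapped into a String at the end (Lean's String.append is kernel-opaque).
def human_readable_mode (mode : Int) : String :=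
  let sbits := mode >>> 9
  let u_modes : List (Int × Char × Int) :=
    [(PySem.Int.band (mode >>> 6) 7, 's', 4),
     (PySem.Int.band (mode >>> 3) 7, 's', 2),
     (PySem.Int.band mode 7, 't', 1)]
  let s := u_modes.foldl (fun s p =>
    let m := p.1
    let ss := p.2.1
    let ssf := p.2.2
    let s := s ++ [if PySem.Int.band m 4 ≠ 0 then 'r' else '-']
    let s := s ++ [if PySem.Int.band m 2 ≠ 0 then 'w' else '-']
    if PySem.Int.band sbits ssf ≠ 0 then
      s ++ [if PySem.Int.band m 1 ≠ 0 then ss else ss.toUpper]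
    else
      s ++ [if PySem.Int.band m 1 ≠ 0 then 'x' else '-']) ([] : List Char)
  String.ofList s

-- ===== PORT B =====
-- B-side helpers: the permission table and the per-group block (strings as List Char)
def pvPerms : List (List Char) :=
  [['-','-','-'], ['-','-','x'], ['-','w','-'], ['-','w','x'],
   ['r','-','-'], ['r','-','x'], ['r','w','-'], ['r','w','x']]

def pvBlock (g : Int) (special : Int) (letter : Char) : List Char :=
  let p := PySem.List.pyGetD pvPerms g []
  if special = 0 then p
  else PySem.List.slice p none (some 2) ++
    [if PySem.Int.band g 1 ≠ 0 then letter else letter.toUpper]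

def human_readable_mode_alt (mode : Int) : String :=
  let sbits := mode >>> 9
  String.ofList (pvBlock (PySem.Int.band (mode >>> 6) 7) (PySem.Int.band sbits 4) 's'
    ++ pvBlock (PySem.Int.band (mode >>> 3) 7) (PySem.Int.band sbits 2) 's'
    ++ pvBlock (PySem.Int.band mode 7) (PySem.Int.band sbits 1) 't')

-- ===== PRECONDITION & SPEC =====
def Spec_human_readable_mode (mode : Int) (out : String) : Prop := out = human_readable_mode_alt mode
instance (mode : Int) (out : String) : Decidable (Spec_human_readable_mode mode out) := by unfold Spec_human_readable_mode; infer_instance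

-- ===== CLAIM (what is proved, stated in full; the proofs are below) =====
def Claim_equal_human_readable_mode : Prop := ∀ (mode : Int), Dom_human_readable_mode mode → Spec_human_readable_mode mode (human_readable_mode mode)

-- ===== LEMMAS AND PROOFS =====

-- a & 7 is a 3-bit value, whatever the sign of a
theorem pv_band7_nonneg (a : Int) : 0 ≤ PySem.Int.band a 7 := by
  unfold PySem.Int.band
  split_ifs <;> simp_all

theorem pv_band7_lt (a : Int) : PySem.Int.band a 7 < 8 := by
  unfold PySem.Int.band
  split_ifs with h1 h2 h3
  · have : a.toNat &&& (7:Int).toNat ≤ (7:Int).toNat := Nat.and_le_right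
    omega
  · omega
  · have : (7:Int).toNat - ((7:Int).toNat &&& (-a - 1).toNat) ≤ (7:Int).toNat := Nat.sub_le _ _
    omega
  · omega

-- one group: A's three per-bit characters equal B's table block
theorem pv_group_eq (m sp : Int) (ss : Char) (h0 : 0 ≤ m) (h8 : m < 8) :
    [if PySem.Int.band m 4 ≠ 0 then 'r' else '-',
     if PySem.Int.band m 2 ≠ 0 then 'w' else '-',
     if sp ≠ 0 then (if PySem.Int.band m 1 ≠ 0 then ss else ss.toUpper)
       else (if PySem.Int.band m 1 ≠ 0 then 'x' else '-')]
    = pvBlock m sp ss := by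
  by_cases h : sp = 0 <;> interval_cases m <;>
    simp [pvBlock, h, pvPerms, PySem.List.pyGetD, PySem.List.pyGet?,
      PySem.List.pyIdx?, PySem.List.slice, PySem.Int.band]

-- ===== VERDICT (by name: the statement is the Claim_ definition above) =====
theorem human_readable_mode_spec : Claim_equal_human_readable_mode := by
  intro mode _
  unfold Spec_human_readable_mode human_readable_mode human_readable_mode_alt
  simp only [List.foldl, List.nil_append, List.append_assoc,
    List.cons_append]
  rw [← pv_group_eq _ _ _ (pv_band7_nonneg (mode >>> 6)) (pv_band7_lt (mode >>> 6)),
      ← pv_group_eq _ _ _ (pv_band7_nonneg (mode >>> 3)) (pv_band7_lt (mode >>> 3)),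
      ← pv_group_eq _ _ _ (pv_band7_nonneg mode) (pv_band7_lt mode)]
  by_cases h4 : PySem.Int.band (mode >>> 9) 4 = 0 <;>
    by_cases h2 : PySem.Int.band (mode >>> 9) 2 = 0 <;>
      by_cases h1 : PySem.Int.band (mode >>> 9) 1 = 0 <;>
        simp [h4, h2, h1]
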